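-- pv_equiv track=rewrite | github.com/ppsqkk/bin | sup.py | sup
-- ===== SOURCE A (Python) =====
-- import collections
--
-- Trie = lambda: collections.defaultdict(Trie)
--
-- def sup(w, l):
--     t = Trie()
--     for s in l:
--         prev = t
--         for c in s:
--             prev = prev[c]
--
--     res = ''
--     for c in w:
--         res += c
--
--         # If there is a branch corresponding to the character c, walk the tree.
--         # Otherwise, we know that the current res is a unique prefix.
--         if c in t:
--             t = t[c]
--         else:
--             break
--     return res
-- ===== SOURCE B (Python) =====
-- def sup(w, l):
--     # Filter a shrinking candidate set position-by-position instead of building a trie.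
--     cands = l
--     res = ''
--     for c in w:
--         res += c
--         cands = [s[1:] for s in cands if s[:1] == c]
--         if not cands:
--             break
--     return res
-- ===== Notes on version B (the rewrite author's own statement) =====
-- stated objective: faster
-- what changed: B replaces A's up-front trie construction over all of l (touching every character of every string) with a shrinking candidate-set filter driven by the characters of w, scanning strings only up to len(w) and dropping them as soon as they diverge.
import Mathlib
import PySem

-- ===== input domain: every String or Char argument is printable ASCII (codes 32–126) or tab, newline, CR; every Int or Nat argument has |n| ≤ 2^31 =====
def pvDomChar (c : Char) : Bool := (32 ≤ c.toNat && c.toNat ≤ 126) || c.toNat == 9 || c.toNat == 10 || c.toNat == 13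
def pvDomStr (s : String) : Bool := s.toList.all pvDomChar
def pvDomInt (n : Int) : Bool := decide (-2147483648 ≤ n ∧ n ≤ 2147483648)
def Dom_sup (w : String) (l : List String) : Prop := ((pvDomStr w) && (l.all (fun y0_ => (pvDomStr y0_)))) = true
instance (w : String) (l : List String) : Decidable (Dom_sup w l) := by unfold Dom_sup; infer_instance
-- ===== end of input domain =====

-- B avoids A's trie: it filters a shrinking candidate set position-by-position, scanning strings only up to len(w); the return values are proved equal on all inputs.

-- ===== PORT A =====
-- A's trie: a node is its association list of children (defaultdict(Trie)),
-- in insertion order, as in Python. (No nested inductive: explicit child-list type.)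
inductive TrieL where
  | nil : TrieL
  | cons : Char → TrieL → TrieL → TrieL
deriving DecidableEq, Repr

-- prev = prev[c] for each c of s: walk/create nodes (functional rendering of
-- defaultdict mutation; children are created at the end, as dict insertion does).
mutual
def insP : TrieL → Char → List Char → TrieL
  | .nil, c, cs => .cons c (insStr .nil cs) .nil
  | .cons c' t r, c, cs =>
      if c' = c then .cons c' (insStr t cs) r else .cons c' t (insP r c cs)
termination_by t _ cs => (cs.length, sizeOf t + 1)
def insStr : TrieL → List Char → TrieL
  | t, [] => t
  | t, c :: cs => insP t c cs
termination_by _ cs => (cs.length, 0)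
end

-- 'c in t' / 't = t[c]' (read-only in A's second loop)
def lookupT : TrieL → Char → Option TrieL
  | .nil, _ => none
  | .cons c' t r, c => if c' = c then some t else lookupT r c

-- the second loop of A: res += c, then walk or break
def loopA : TrieL → List Char → List Char
  | _, [] => []
  | t, c :: cs =>
      match lookupT t c with
      | some t' => c :: loopA t' cs
      | none => [c]

def sup (w : String) (l : List String) : String :=
  -- build the trie from l, then walk it along w
  let t := l.foldl (fun t s => insStr t s.toList) .nil
  String.mk (loopA t w.toList)

-- ===== PORT B =====
-- cands = [s[1:] for s in cands if s[:1] == c]   (strings as lists of chars)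
def stepB (c : Char) (cands : List (List Char)) : List (List Char) :=
  cands.filterMap (fun s =>
    match s with
    | [] => none
    | c' :: rest => if c' = c then some rest else none)

def loopB : List (List Char) → List Char → List Char
  | _, [] => []
  | cands, c :: cs =>
      let cands' := stepB c cands
      if cands' = [] then [c] else c :: loopB cands' cs

def sup_alt (w : String) (l : List String) : String :=
  String.mk (loopB (l.map String.toList) w.toList)

-- ===== PRECONDITION & SPEC =====
def Spec_sup (w : String) (l : List String) (out : String) : Prop := out = sup_alt w l
instance (w : String) (l : List String) (out : String) : Decidable (Spec_sup w l out) := by unfold Spec_sup; infer_instance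

-- ===== CLAIM (what is proved, stated in full; the proofs are below) =====
def Claim_equal_sup : Prop := ∀ (w : String) (l : List String), Dom_sup w l → Spec_sup w l (sup w l)

-- ===== LEMMAS AND PROOFS =====

-- lookup after inserting one string
theorem lookupT_insStr (s : List Char) (t : TrieL) (c : Char) :
    lookupT (insStr t s) c =
      match s with
      | [] => lookupT t c
      | c' :: rest =>
          if c' = c then some (insStr ((lookupT t c).getD .nil) rest)
          else lookupT t c := by
  match s with
  | [] => simp [insStr]
  | c' :: rest =>
    simp only [insStr]
    induction t with
    | nil =>
      by_cases h : c' = c <;> simp [insP, lookupT, h]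
    | cons c'' t' r _ ih2 =>
      by_cases h1 : c'' = c'
      · subst h1
        by_cases h2 : c'' = c <;> simp [insP, lookupT, h2]
      · by_cases h2 : c'' = c
        · subst h2
          have h3 : ¬ c' = c'' := fun hh => h1 hh.symm
          simp [insP, lookupT, h1, h3]
        · simp [insP, lookupT, h1, h2, ih2]

-- lookup in the trie of a list, relative to an accumulator trie
theorem lookupT_foldl (ls : List (List Char)) (t : TrieL) (c : Char) :
    lookupT (ls.foldl insStr t) c =
      if lookupT t c = none ∧ stepB c ls = [] then none
      else some ((stepB c ls).foldl insStr ((lookupT t c).getD .nil)) := by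
  induction ls generalizing t with
  | nil =>
    simp only [List.foldl_nil, stepB, List.filterMap_nil]
    cases h : lookupT t c <;> simp [h]
  | cons s ls ih =>
    simp only [List.foldl_cons]
    rw [ih, lookupT_insStr s t c]
    match s with
    | [] => simp [stepB]
    | c' :: rest =>
      by_cases h : c' = c
      · subst h
        simp [stepB]
      · simp [stepB, h]

-- the two loops agree: walking the trie of ls = filtering the candidate set ls
theorem loopA_eq_loopB (cs : List Char) (ls : List (List Char)) :
    loopA (ls.foldl insStr .nil) cs = loopB ls cs := by
  induction cs generalizing ls with
  | nil => simp [loopA, loopB]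
  | cons c cs ih =>
    have h := lookupT_foldl ls .nil c
    by_cases he : stepB c ls = []
    · have hn : lookupT (ls.foldl insStr .nil) c = none := by
        rw [h]; simp [lookupT, he]
      simp [loopA, loopB, hn, he]
    · have hs : lookupT (ls.foldl insStr .nil) c
          = some ((stepB c ls).foldl insStr .nil) := by
        rw [h]; simp [lookupT, he]
      simp [loopA, loopB, hs, he, ih]

-- ===== VERDICT (by name: the statement is the Claim_ definition above) =====
theorem sup_spec : Claim_equal_sup := by
  intro w l _
  unfold Spec_sup sup sup_alt
  rw [← List.foldl_map (f := String.toList) (g := insStr)]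
  exact congrArg String.mk (loopA_eq_loopB w.toList (l.map String.toList))
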